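-- pv_equiv track=rewrite | github.com/42Bangkok-DPs/discovery-piscine-coding-for-all-18-22-nov-snowfake99 | Rush00/ex00/checkmate.py | checkmate
-- ===== SOURCE A (Python) =====
-- def can_attack(piece, position, king_pos, board):
--     """
--     ตรวจสอบว่าตัวหมากสามารถโจมตี King ได้หรือไม่
--     """
--     directions = {
--         'P': [(-1, -1), (-1, 1)],  # Pawn โจมตีเฉียงซ้ายบนและขวาบน
--         'B': [(-1, -1), (-1, 1), (1, -1), (1, 1)],  # Bishop โจมตีแนวทแยง
--         'R': [(0, -1), (0, 1), (-1, 0), (1, 0)],  # Rook โจมตีแนวตั้งและแนวนอน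
--         'Q': [(-1, -1), (-1, 1), (1, -1), (1, 1), (0, -1), (0, 1), (-1, 0), (1, 0)]  # Queen รวม Bishop และ Rook
--     }
--
--     if piece not in directions:
--         return False
--
--     for dr, dc in directions[piece]:
--         r, c = position
--         if piece == 'P':  # Pawn โจมตีได้แค่ 1 ช่อง
--             r += dr
--             c += dc
--             if (r, c) == king_pos:
--                 return True
--             continue
--
--         while 0 <= r < len(board) and 0 <= c < len(board[r]):  # เดินไปเรื่อย ๆ ตามทิศทาง
--             r += dr
--             c += dc
--             if (r, c) == king_pos:
--                 return True
--             if 0 <= r < len(board) and 0 <= c < len(board[r]) and board[r][c] != '.':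
--                 break
--
--     return False
--
-- def checkmate(board):
--     """
--     ตรวจสอบว่ามีตัวหมากใดสามารถโจมตี King ได้หรือไม่
--     """
--     # หาตำแหน่ง King
--     king_pos = None
--     for i, row in enumerate(board):
--         for j, cell in enumerate(row):
--             if cell == 'K':
--                 king_pos = (i, j)
--                 break
--         if king_pos:
--             break
--
--     if not king_pos:
--         return "Fail"  # ไม่มี King บนกระดาน
--
--     # ตรวจสอบตัวหมากทั้งหมดบนกระดาน
--     for i, row in enumerate(board):
--         for j, cell in enumerate(row):
--             if cell in "PBRQ":  # ตัวหมากที่สามารถโจมตีได้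
--                 if can_attack(cell, (i, j), king_pos, board):
--                     return "Success"  # พบการโจมตีแล้ว
--
--     return "Fail"  # ไม่มีตัวหมากใดโจมตี King ได้
-- ===== SOURCE B (Python) =====
-- def checkmate(board):
--     # Find the king (first 'K' in row-major order).
--     king = None
--     for i, row in enumerate(board):
--         for j, ch in enumerate(row):
--             if ch == 'K':
--                 king = (i, j)
--                 break
--         if king is not None:
--             break
--     if king is None:
--         return "Fail"
--     kr, kc = king
--     # Cast the 8 rays outward from the king; only the FIRST piece met on each
--     # ray can attack along it.
--     for dr, dc in ((-1, -1), (-1, 0), (-1, 1), (0, -1), (0, 1), (1, -1), (1, 0), (1, 1)):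
--         r, c, dist = kr + dr, kc + dc, 1
--         while 0 <= r < len(board) and 0 <= c < len(board[r]):
--             ch = board[r][c]
--             if ch != '.':
--                 if dr == 0 or dc == 0:
--                     if ch in ('R', 'Q'):
--                         return "Success"
--                 else:
--                     if ch in ('B', 'Q') or (ch == 'P' and dist == 1 and dr == 1):
--                         return "Success"
--                 break
--             r += dr
--             c += dc
--             dist += 1
--     return "Fail"
-- ===== Notes on version B (the rewrite author's own statement) =====
-- stated objective: alternative
-- what changed: Instead of testing every piece on the board and walking a ray from each piece toward the king, B casts the 8 rays outward from the king once and only classifies the first piece met on each ray (plus the pawn distance-1 rule); on piece-heavy boards the costs are similar, which is what a timing run measures.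
import Mathlib
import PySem

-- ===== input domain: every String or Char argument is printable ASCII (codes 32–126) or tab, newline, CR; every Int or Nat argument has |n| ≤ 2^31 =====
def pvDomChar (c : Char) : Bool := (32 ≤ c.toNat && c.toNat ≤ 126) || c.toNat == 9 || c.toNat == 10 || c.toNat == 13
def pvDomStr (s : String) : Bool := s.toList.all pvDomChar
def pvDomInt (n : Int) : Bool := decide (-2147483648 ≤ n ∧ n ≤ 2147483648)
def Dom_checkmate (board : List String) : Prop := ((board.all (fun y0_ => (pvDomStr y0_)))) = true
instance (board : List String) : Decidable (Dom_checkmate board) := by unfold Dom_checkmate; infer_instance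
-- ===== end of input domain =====

-- B casts the 8 rays outward from the king once (classifying only the first piece met on
-- each ray) instead of A's walking a ray from every piece toward the king: objective = alternative.

-- ===== PORT A =====
-- shared cell-access helpers (each port only indexes after its own in-bounds guard,
-- exactly like the Python's `0 <= r < len(board) and 0 <= c < len(board[r])`)
def pvGrid (board : List String) : List (List Char) := board.map String.toList
def pvInB (g : List (List Char)) (r c : Int) : Bool :=
  decide (0 ≤ r ∧ r < (g.length : Int)) &&
  decide (0 ≤ c ∧ c < ((g.getD r.toNat []).length : Int))
def pvAt (g : List (List Char)) (r c : Int) : Char :=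
  (g.getD r.toNat []).getD c.toNat '.'
-- enough steps for any ray to run off the board (the Python while-loops terminate for
-- the same reason: each step moves one row or one column monotonically)
def pvFuel (g : List (List Char)) : Nat :=
  g.length + (g.map List.length).foldr max 0 + 2

-- `directions` table of A ([] = `piece not in directions`, i.e. can_attack returns False)
def pvDirsA (piece : Char) : List (Int × Int) :=
  if piece = 'P' then [(-1,-1),(-1,1)]
  else if piece = 'B' then [(-1,-1),(-1,1),(1,-1),(1,1)]
  else if piece = 'R' then [(0,-1),(0,1),(-1,0),(1,0)]
  else if piece = 'Q' then [(-1,-1),(-1,1),(1,-1),(1,1),(0,-1),(0,1),(-1,0),(1,0)]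
  else []

-- the sliding `while` loop of can_attack
def pvRayA (g : List (List Char)) (king : Int × Int) (dr dc : Int) : Nat → Int → Int → Bool
  | 0, _, _ => false
  | fuel+1, r, c =>
    if pvInB g r c then
      if (r + dr, c + dc) = king then true
      else if pvInB g (r + dr) (c + dc) && pvAt g (r + dr) (c + dc) ≠ '.' then false
      else pvRayA g king dr dc fuel (r + dr) (c + dc)
    else false

def pvCanAttack (g : List (List Char)) (piece : Char) (pos king : Int × Int) : Bool :=
  (pvDirsA piece).any fun d =>
    if piece = 'P' then decide ((pos.1 + d.1, pos.2 + d.2) = king)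
    else pvRayA g king d.1 d.2 (pvFuel g) pos.1 pos.2

-- `for j, cell in enumerate(row): if cell in "PBRQ": if can_attack(...): return "Success"`
def pvScanRowA (g : List (List Char)) (king : Int × Int) (i : Int) : Int → List Char → Bool
  | _, [] => false
  | j, ch :: rest =>
    if ch = 'P' ∨ ch = 'B' ∨ ch = 'R' ∨ ch = 'Q' then
      pvCanAttack g ch (i, j) king || pvScanRowA g king i (j + 1) rest
    else pvScanRowA g king i (j + 1) rest

def pvScanA (g : List (List Char)) (king : Int × Int) : Int → List (List Char) → Bool
  | _, [] => false
  | i, row :: rest => pvScanRowA g king i 0 row || pvScanA g king (i + 1) rest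

-- king search: first 'K' in the row (inner break), first such row (outer break)
def pvFindKRow : Int → List Char → Option Int
  | _, [] => none
  | j, ch :: rest => if ch = 'K' then some j else pvFindKRow (j + 1) rest

def pvFindK : Int → List (List Char) → Option (Int × Int)
  | _, [] => none
  | i, row :: rest =>
    match pvFindKRow 0 row with
    | some j => some (i, j)
    | none => pvFindK (i + 1) rest

def checkmate (board : List String) : String :=
  let g := pvGrid board
  match pvFindK 0 g with
  | none => "Fail"
  | some king => if pvScanA g king 0 g then "Success" else "Fail"

-- ===== PORT B =====
-- classification of the first piece met on a ray from the king (B's inner `if` chain)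
def pvAttackerOnRay (dr dc dist : Int) (ch : Char) : Bool :=
  if dr = 0 ∨ dc = 0 then ch = 'R' ∨ ch = 'Q'
  else (ch = 'B' ∨ ch = 'Q') ∨ (ch = 'P' ∧ dist = 1 ∧ dr = 1)

-- B's `while` loop: walk outward until the first occupied square (or off the board)
def pvRayB (g : List (List Char)) (dr dc : Int) : Nat → Int → Int → Int → Bool
  | 0, _, _, _ => false
  | fuel+1, r, c, dist =>
    if pvInB g r c then
      if pvAt g r c ≠ '.' then pvAttackerOnRay dr dc dist (pvAt g r c)
      else pvRayB g dr dc fuel (r + dr) (c + dc) (dist + 1)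
    else false

def pvDirs8 : List (Int × Int) :=
  [(-1,-1),(-1,0),(-1,1),(0,-1),(0,1),(1,-1),(1,0),(1,1)]

-- B's king search (same nested-loop search as its Python)
def pvFindKRowB : Int → List Char → Option Int
  | _, [] => none
  | j, ch :: rest => if ch = 'K' then some j else pvFindKRowB (j + 1) rest

def pvFindKB : Int → List (List Char) → Option (Int × Int)
  | _, [] => none
  | i, row :: rest =>
    match pvFindKRowB 0 row with
    | some j => some (i, j)
    | none => pvFindKB (i + 1) rest

def checkmate_alt (board : List String) : String :=
  let g := pvGrid board
  match pvFindKB 0 g with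
  | none => "Fail"
  | some king =>
    if pvDirs8.any (fun d => pvRayB g d.1 d.2 (pvFuel g) (king.1 + d.1) (king.2 + d.2) 1)
    then "Success" else "Fail"

-- ===== PRECONDITION & SPEC =====
def Spec_checkmate (board : List String) (out : String) : Prop := out = checkmate_alt board
instance (board : List String) (out : String) : Decidable (Spec_checkmate board out) := by unfold Spec_checkmate; infer_instance

-- ===== CLAIM (what is proved, stated in full; the proofs are below) =====
def Claim_equal_checkmate : Prop := ∀ (board : List String), Dom_checkmate board → Spec_checkmate board (checkmate board)

-- ===== LEMMAS AND PROOFS =====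

-- a run of `m` empty in-bounds squares starting AT (r,c), stepping by (dr,dc)
def pvClearFrom (g : List (List Char)) (r c dr dc : Int) (m : Nat) : Prop :=
  ∀ t : Nat, t < m →
    pvInB g (r + t * dr) (c + t * dc) = true ∧ pvAt g (r + t * dr) (c + t * dc) = '.'

-- the king-centric attack predicate both ports are reduced to
def pvAtt (g : List (List Char)) (q : Int × Int) : Prop :=
  ∃ dr dc : Int, (dr, dc) ∈ pvDirs8 ∧ ∃ m : Nat,
    pvClearFrom g (q.1 + dr) (q.2 + dc) dr dc m ∧
    pvInB g (q.1 + dr + m * dr) (q.2 + dc + m * dc) = true ∧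
    pvAt g (q.1 + dr + m * dr) (q.2 + dc + m * dc) ≠ '.' ∧
    pvAttackerOnRay dr dc (1 + m) (pvAt g (q.1 + dr + m * dr) (q.2 + dc + m * dc)) = true

def pvPieceP (ch : Char) : Prop := ch = 'P' ∨ ch = 'B' ∨ ch = 'R' ∨ ch = 'Q'

lemma pvPos_succ (r dr : Int) (m : Nat) :
    r + ((m + 1 : Nat) : Int) * dr = r + dr + (m : Int) * dr := by push_cast; ring

lemma pvClearFrom_zero (g : List (List Char)) (r c dr dc : Int) :
    pvClearFrom g r c dr dc 0 := fun t ht => absurd ht (Nat.not_lt_zero t)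

lemma pvClearFrom_succ (g : List (List Char)) (r c dr dc : Int) (m : Nat) :
    pvClearFrom g r c dr dc (m + 1) ↔
      (pvInB g r c = true ∧ pvAt g r c = '.') ∧ pvClearFrom g (r + dr) (c + dc) dr dc m := by
  constructor
  · intro h
    refine ⟨by simpa using h 0 (by omega), ?_⟩
    intro t ht
    have h' := h (t + 1) (by omega)
    rw [pvPos_succ r dr t, pvPos_succ c dc t] at h'
    exact h'
  · rintro ⟨⟨h1, h2⟩, h⟩
    intro t ht
    cases t with
    | zero => simpa using And.intro h1 h2
    | succ s =>
      have h' := h s (by omega)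
      rw [pvPos_succ r dr s, pvPos_succ c dc s]
      exact h'

lemma pvInB_nat (g : List (List Char)) (i j : Nat) :
    pvInB g i j = true ↔ i < g.length ∧ j < (g.getD i []).length := by
  constructor
  · intro h
    simp only [pvInB, Bool.and_eq_true, decide_eq_true_eq, Int.toNat_natCast] at h
    omega
  · intro h
    simp only [pvInB, Bool.and_eq_true, decide_eq_true_eq, Int.toNat_natCast]
    omega

lemma pvInB_exists_nat (g : List (List Char)) (r c : Int) (h : pvInB g r c = true) :
    ∃ i j : Nat, r = i ∧ c = j := by
  simp only [pvInB, Bool.and_eq_true, decide_eq_true_eq] at h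
  exact ⟨r.toNat, c.toNat, (Int.toNat_of_nonneg h.1.1).symm, (Int.toNat_of_nonneg h.2.1).symm⟩

lemma pvAt_nat (g : List (List Char)) (i j : Nat) :
    pvAt g i j = (g.getD i []).getD j '.' := by
  simp [pvAt]

lemma pvRowLen_le (g : List (List Char)) (i : Nat) (h : i < g.length) :
    (g.getD i []).length ≤ (g.map List.length).foldr max 0 := by
  induction g generalizing i with
  | nil => simp at h
  | cons row rest ih =>
    cases i with
    | zero => simp
    | succ n =>
      simp only [List.getD_cons_succ, List.map_cons, List.foldr_cons]
      exact le_trans (ih n (by simpa using h)) (le_max_right _ _)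

-- endpoints of a ray bound its length
lemma pvBound (g : List (List Char)) (dr dc r c : Int) (k : Nat)
    (hd : (dr, dc) ∈ pvDirs8)
    (h1 : pvInB g r c = true) (h2 : pvInB g (r + k * dr) (c + k * dc) = true) :
    k < pvFuel g := by
  simp only [pvInB, Bool.and_eq_true, decide_eq_true_eq] at h1 h2
  obtain ⟨⟨hr0, hr1⟩, hc0, hc1⟩ := h1
  simp only [pvDirs8, List.mem_cons, List.not_mem_nil, or_false, Prod.mk.injEq] at hd
  unfold pvFuel
  obtain ⟨rfl,rfl⟩|⟨rfl,rfl⟩|⟨rfl,rfl⟩|⟨rfl,rfl⟩|⟨rfl,rfl⟩|⟨rfl,rfl⟩|⟨rfl,rfl⟩|⟨rfl,rfl⟩ := hd <;>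
    simp only [mul_zero, mul_one, mul_neg_one, add_zero] at h2 <;>
    obtain ⟨⟨hr0', hr1'⟩, hc0', hc1'⟩ := h2 <;>
    have hMr := pvRowLen_le g r.toNat (by omega) <;>
    omega

lemma pvRayA_sound (g : List (List Char)) (king : Int × Int) (dr dc : Int) :
    ∀ (fuel : Nat) (r c : Int), pvRayA g king dr dc fuel r c = true →
      pvInB g r c = true ∧ ∃ m : Nat,
        pvClearFrom g (r + dr) (c + dc) dr dc m ∧
        (r + dr + m * dr, c + dc + m * dc) = king := by
  intro fuel
  induction fuel with
  | zero => intro r c h; simp [pvRayA] at h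
  | succ f ih =>
    intro r c h
    simp only [pvRayA] at h
    split at h
    case isFalse hin => simp at h
    case isTrue hin =>
      split at h
      case isTrue hk =>
        exact ⟨hin, 0, pvClearFrom_zero g _ _ _ _, by simpa using hk⟩
      case isFalse hk =>
        split at h
        case isTrue hb => simp at h
        case isFalse hb =>
          obtain ⟨hin', m, hc, hend⟩ := ih _ _ h
          have hdot : pvAt g (r + dr) (c + dc) = '.' := by
            by_contra hne
            exact hb (by simp [hin', hne])
          refine ⟨hin, m + 1, ?_, ?_⟩
          · exact (pvClearFrom_succ g _ _ dr dc m).mpr ⟨⟨hin', hdot⟩, hc⟩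
          · rw [pvPos_succ (r + dr) dr m, pvPos_succ (c + dc) dc m]
            exact hend

lemma pvRayA_complete (g : List (List Char)) (king : Int × Int) (dr dc : Int) :
    ∀ (m fuel : Nat) (r c : Int), m < fuel → pvInB g r c = true →
      pvClearFrom g (r + dr) (c + dc) dr dc m →
      (r + dr + m * dr, c + dc + m * dc) = king →
      pvRayA g king dr dc fuel r c = true := by
  intro m
  induction m with
  | zero =>
    intro fuel r c hf hin hc hk
    cases fuel with
    | zero => omega
    | succ f =>
      simp only [pvRayA]
      rw [if_pos hin, if_pos (by simpa using hk)]
  | succ n ihn =>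
    intro fuel r c hf hin hc hk
    cases fuel with
    | zero => omega
    | succ f =>
      obtain ⟨⟨h1, h2⟩, hc'⟩ := (pvClearFrom_succ g _ _ dr dc n).mp hc
      rw [pvPos_succ (r + dr) dr n, pvPos_succ (c + dc) dc n] at hk
      simp only [pvRayA]
      rw [if_pos hin]
      by_cases hkk : (r + dr, c + dc) = king
      · rw [if_pos hkk]
      · rw [if_neg hkk, if_neg (by simp [h2])]
        exact ihn f (r + dr) (c + dc) (by omega) h1 hc' hk

lemma pvRayB_sound (g : List (List Char)) (dr dc : Int) :
    ∀ (fuel : Nat) (r c dist : Int), pvRayB g dr dc fuel r c dist = true →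
      ∃ m : Nat, pvClearFrom g r c dr dc m ∧
        pvInB g (r + m * dr) (c + m * dc) = true ∧
        pvAt g (r + m * dr) (c + m * dc) ≠ '.' ∧
        pvAttackerOnRay dr dc (dist + m) (pvAt g (r + m * dr) (c + m * dc)) = true := by
  intro fuel
  induction fuel with
  | zero => intro r c dist h; simp [pvRayB] at h
  | succ f ih =>
    intro r c dist h
    simp only [pvRayB] at h
    split at h
    case isFalse hin => simp at h
    case isTrue hin =>
      split at h
      case isTrue hne =>
        refine ⟨0, pvClearFrom_zero g _ _ _ _, by simpa using hin, by simpa using hne, ?_⟩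
        simpa using h
      case isFalse hne =>
        obtain ⟨m, hc, hin', hne', hat⟩ := ih _ _ _ h
        have hdot : pvAt g r c = '.' := by
          by_contra hx
          exact hne hx
        refine ⟨m + 1, (pvClearFrom_succ g _ _ dr dc m).mpr ⟨⟨hin, hdot⟩, hc⟩, ?_, ?_, ?_⟩
        · rw [pvPos_succ r dr m, pvPos_succ c dc m]; exact hin'
        · rw [pvPos_succ r dr m, pvPos_succ c dc m]; exact hne'
        · rw [pvPos_succ r dr m, pvPos_succ c dc m]
          have he : dist + ((m + 1 : Nat) : Int) = dist + 1 + (m : Int) := by push_cast; ring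
          rw [he]
          exact hat

lemma pvRayB_complete (g : List (List Char)) (dr dc : Int) :
    ∀ (m fuel : Nat) (r c dist : Int), m < fuel →
      pvClearFrom g r c dr dc m →
      pvInB g (r + m * dr) (c + m * dc) = true →
      pvAt g (r + m * dr) (c + m * dc) ≠ '.' →
      pvAttackerOnRay dr dc (dist + m) (pvAt g (r + m * dr) (c + m * dc)) = true →
      pvRayB g dr dc fuel r c dist = true := by
  intro m
  induction m with
  | zero =>
    intro fuel r c dist hf hc hin hne hat
    cases fuel with
    | zero => omega
    | succ f =>
      simp only [pvRayB]
      rw [if_pos (by simpa using hin), if_pos (by simpa using hne)]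
      simpa using hat
  | succ n ihn =>
    intro fuel r c dist hf hc hin hne hat
    cases fuel with
    | zero => omega
    | succ f =>
      obtain ⟨⟨h1, h2⟩, hc'⟩ := (pvClearFrom_succ g _ _ dr dc n).mp hc
      rw [pvPos_succ r dr n, pvPos_succ c dc n] at hin hne hat
      simp only [pvRayB]
      rw [if_pos h1, if_neg (by simp [h2])]
      apply ihn f (r + dr) (c + dc) (dist + 1) (by omega) hc' hin hne
      have he : dist + 1 + (n : Int) = dist + ((n + 1 : Nat) : Int) := by push_cast; ring
      rw [he]
      exact hat

-- reversing a clear run: walking it from the other end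
lemma pvClearFrom_rev (g : List (List Char)) (p q : Int × Int) (dr dc : Int) (m : Nat)
    (hc : pvClearFrom g (p.1 + dr) (p.2 + dc) dr dc m)
    (h1 : p.1 + dr + m * dr = q.1) (h2 : p.2 + dc + m * dc = q.2) :
    pvClearFrom g (q.1 + -dr) (q.2 + -dc) (-dr) (-dc) m := by
  intro t ht
  have hcc := hc (m - 1 - t) (by omega)
  have hmt : ((m - 1 - t : Nat) : Int) = (m : Int) - 1 - t := by omega
  have e1 : q.1 + -dr + (t : Int) * -dr = p.1 + dr + ((m - 1 - t : Nat) : Int) * dr := by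
    rw [hmt, ← h1]; ring
  have e2 : q.2 + -dc + (t : Int) * -dc = p.2 + dc + ((m - 1 - t : Nat) : Int) * dc := by
    rw [hmt, ← h2]; ring
  rw [e1, e2]
  exact hcc

-- the first piece on the ray attacks along it  ⟺  A lists the reversed direction for it
lemma pvMatch_iff (dr dc : Int) (k : Int) (ch : Char) (hd : (dr, dc) ∈ pvDirs8) :
    pvAttackerOnRay dr dc k ch = true ↔
      (pvPieceP ch ∧ (-dr, -dc) ∈ pvDirsA ch ∧ (ch = 'P' → k = 1)) := by
  simp only [pvDirs8, List.mem_cons, List.not_mem_nil, or_false, Prod.mk.injEq] at hd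
  obtain ⟨rfl,rfl⟩|⟨rfl,rfl⟩|⟨rfl,rfl⟩|⟨rfl,rfl⟩|⟨rfl,rfl⟩|⟨rfl,rfl⟩|⟨rfl,rfl⟩|⟨rfl,rfl⟩ := hd <;>
    (by_cases hP : ch = 'P' <;> by_cases hB : ch = 'B' <;> by_cases hR : ch = 'R' <;>
      by_cases hQ : ch = 'Q' <;> simp_all [pvAttackerOnRay, pvDirsA, pvPieceP])

lemma pvScanRowA_iff (g : List (List Char)) (q : Int × Int) (i : Int) :
    ∀ (l : List Char) (j : Int), pvScanRowA g q i j l = true ↔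
      ∃ t : Nat, t < l.length ∧ pvPieceP (l.getD t '.') ∧
        pvCanAttack g (l.getD t '.') (i, j + t) q = true := by
  intro l
  induction l with
  | nil => intro j; simp [pvScanRowA]
  | cons ch rest ih =>
    intro j
    simp only [pvScanRowA]
    by_cases hch : ch = 'P' ∨ ch = 'B' ∨ ch = 'R' ∨ ch = 'Q'
    · rw [if_pos hch]
      simp only [Bool.or_eq_true, ih (j + 1)]
      constructor
      · rintro (hat | ⟨t, ht, hp, hatt⟩)
        · exact ⟨0, by simp, hch, by simpa using hat⟩
        · refine ⟨t + 1, by simpa using ht, by simpa using hp, ?_⟩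
          have e2 : j + ((t + 1 : Nat) : Int) = j + 1 + (t : Int) := by push_cast; ring
          simp only [List.getD_cons_succ]
          rw [e2]
          exact hatt
      · rintro ⟨t, ht, hp, hatt⟩
        cases t with
        | zero => left; simpa using hatt
        | succ v =>
          right
          refine ⟨v, by simpa using ht, by simpa using hp, ?_⟩
          have e2 : j + ((v + 1 : Nat) : Int) = j + 1 + (v : Int) := by push_cast; ring
          simp only [List.getD_cons_succ] at hatt
          rw [e2] at hatt
          exact hatt
    · rw [if_neg hch]
      rw [ih (j + 1)]
      constructor
      · rintro ⟨t, ht, hp, hatt⟩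
        refine ⟨t + 1, by simpa using ht, by simpa using hp, ?_⟩
        have e2 : j + ((t + 1 : Nat) : Int) = j + 1 + (t : Int) := by push_cast; ring
        simp only [List.getD_cons_succ]
        rw [e2]
        exact hatt
      · rintro ⟨t, ht, hp, hatt⟩
        cases t with
        | zero => exact absurd (by simpa using hp) hch
        | succ v =>
          refine ⟨v, by simpa using ht, by simpa using hp, ?_⟩
          have e2 : j + ((v + 1 : Nat) : Int) = j + 1 + (v : Int) := by push_cast; ring
          simp only [List.getD_cons_succ] at hatt
          rw [e2] at hatt
          exact hatt

lemma pvScanA_iff (g : List (List Char)) (q : Int × Int) :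
    ∀ (rows : List (List Char)) (i : Int), pvScanA g q i rows = true ↔
      ∃ u : Nat, u < rows.length ∧ pvScanRowA g q (i + u) 0 (rows.getD u []) = true := by
  intro rows
  induction rows with
  | nil => intro i; simp [pvScanA]
  | cons row rest ih =>
    intro i
    simp only [pvScanA, Bool.or_eq_true, ih (i + 1)]
    constructor
    · rintro (hrow | ⟨u, hu, hs⟩)
      · exact ⟨0, by simp, by simpa using hrow⟩
      · refine ⟨u + 1, by simpa using hu, ?_⟩
        have e : i + ((u + 1 : Nat) : Int) = i + 1 + (u : Int) := by push_cast; ring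
        simp only [List.getD_cons_succ]
        rw [e]
        exact hs
    · rintro ⟨u, hu, hs⟩
      cases u with
      | zero => left; simpa using hs
      | succ v =>
        right
        refine ⟨v, by simpa using hu, ?_⟩
        have e : i + ((v + 1 : Nat) : Int) = i + 1 + (v : Int) := by push_cast; ring
        simp only [List.getD_cons_succ] at hs
        rw [e] at hs
        exact hs

lemma pvFindKRow_spec (l : List Char) : ∀ (j0 j : Int), pvFindKRow j0 l = some j →
    ∃ v : Nat, j = j0 + v ∧ v < l.length := by
  induction l with
  | nil => intro j0 j h; simp [pvFindKRow] at h
  | cons ch rest ih =>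
    intro j0 j h
    simp only [pvFindKRow] at h
    by_cases hc : ch = 'K'
    · rw [if_pos hc, Option.some.injEq] at h
      exact ⟨0, by push_cast; omega, by simp⟩
    · rw [if_neg hc] at h
      obtain ⟨v, hv, hlt⟩ := ih (j0+1) j h
      exact ⟨v+1, by push_cast at hv ⊢; omega, by simpa using hlt⟩

lemma pvFindK_spec (rows : List (List Char)) : ∀ (i0 : Int) (r c : Int),
    pvFindK i0 rows = some (r, c) →
    ∃ u v : Nat, r = i0 + u ∧ c = v ∧ u < rows.length ∧ v < (rows.getD u []).length := by
  induction rows with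
  | nil => intro i0 r c h; simp [pvFindK] at h
  | cons row rest ih =>
    intro i0 r c h
    simp only [pvFindK] at h
    cases hrow : pvFindKRow 0 row with
    | some j =>
      rw [hrow] at h
      have h' : i0 = r ∧ j = c := by
        simpa only [Option.some.injEq, Prod.mk.injEq] using h
      obtain ⟨v, hv, hlt⟩ := pvFindKRow_spec row 0 j hrow
      obtain ⟨e1, e2⟩ := h'
      refine ⟨0, v, by push_cast; omega, by omega, by simp, ?_⟩
      simpa [← e2, ← hv] using hlt
    | none =>
      rw [hrow] at h
      obtain ⟨u, v, h1, h2, h3, h4⟩ := ih (i0 + 1) r c h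
      exact ⟨u + 1, v, by push_cast; omega, h2, by simp; omega, by simpa using h4⟩

lemma pvFindK_inB (g : List (List Char)) (q : Int × Int)
    (h : pvFindK 0 g = some q) : pvInB g q.1 q.2 = true := by
  obtain ⟨u, v, h1, h2, h3, h4⟩ := pvFindK_spec g 0 q.1 q.2 (by simpa using h)
  have h1 : q.1 = (u : Int) := by omega
  rw [h1, h2, pvInB_nat]
  exact ⟨h3, h4⟩

lemma pvFindKRowB_eq : pvFindKRowB = pvFindKRow := by
  funext j l
  induction l generalizing j with
  | nil => rfl
  | cons ch rest ih => simp [pvFindKRowB, pvFindKRow, ih]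

lemma pvFindKB_eq : pvFindKB = pvFindK := by
  funext i rows
  induction rows generalizing i with
  | nil => rfl
  | cons row rest ih => simp [pvFindKB, pvFindK, pvFindKRowB_eq, ih]

lemma pvDirsA_mem_dirs8 (ch : Char) (d : Int × Int) (h : d ∈ pvDirsA ch) :
    (-d.1, -d.2) ∈ pvDirs8 := by
  unfold pvDirsA at h
  split_ifs at h
  · rcases (by simpa using h : d = (-1,-1) ∨ d = (-1,1)) with rfl | rfl <;> decide
  · rcases (by simpa using h : d = (-1,-1) ∨ d = (-1,1) ∨ d = (1,-1) ∨ d = (1,1)) with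
      rfl | rfl | rfl | rfl <;> decide
  · rcases (by simpa using h : d = (0,-1) ∨ d = (0,1) ∨ d = (-1,0) ∨ d = (1,0)) with
      rfl | rfl | rfl | rfl <;> decide
  · rcases (by simpa using h :
        d = (-1,-1) ∨ d = (-1,1) ∨ d = (1,-1) ∨ d = (1,1) ∨
        d = (0,-1) ∨ d = (0,1) ∨ d = (-1,0) ∨ d = (1,0)) with
      rfl | rfl | rfl | rfl | rfl | rfl | rfl | rfl <;> decide
  · exact absurd h (List.not_mem_nil)

-- A's whole scan ⟺ the king-centric predicate
lemma pvA_iff_att (g : List (List Char)) (q : Int × Int) (hq : pvInB g q.1 q.2 = true) :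
    pvScanA g q 0 g = true ↔ pvAtt g q := by
  rw [pvScanA_iff]
  constructor
  · rintro ⟨u, hu, hrow⟩
    rw [pvScanRowA_iff] at hrow
    obtain ⟨v, hv, hp, hatt⟩ := hrow
    simp only [zero_add] at hatt
    have hpin : pvInB g (u : Int) (v : Int) = true := (pvInB_nat g u v).mpr ⟨hu, hv⟩
    have hpat : pvAt g (u : Int) (v : Int) = (g.getD u []).getD v '.' := pvAt_nat g u v
    unfold pvCanAttack at hatt
    rw [List.any_eq_true] at hatt
    obtain ⟨d, hdmem, hd⟩ := hatt
    by_cases hP : (g.getD u []).getD v '.' = 'P'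
    · rw [if_pos hP, decide_eq_true_eq] at hd
      have hq1 : (u : Int) + d.1 = q.1 := congrArg Prod.fst hd
      have hq2 : (v : Int) + d.2 = q.2 := congrArg Prod.snd hd
      rw [hP] at hdmem
      have hdmem' : d = (-1, -1) ∨ d = (-1, 1) := by simpa [pvDirsA] using hdmem
      rcases hdmem' with rfl | rfl
      · refine ⟨1, 1, by decide, 0, pvClearFrom_zero g _ _ _ _, ?_, ?_, ?_⟩ <;>
          (have E1 : q.1 + 1 + ((0:Nat):Int) * 1 = (u : Int) := by push_cast at hq1 ⊢; omega) <;>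
          (have E2 : q.2 + 1 + ((0:Nat):Int) * 1 = (v : Int) := by push_cast at hq2 ⊢; omega) <;>
          rw [E1, E2]
        · exact hpin
        · rw [hpat, hP]; decide
        · rw [hpat, hP]; decide
      · refine ⟨1, -1, by decide, 0, pvClearFrom_zero g _ _ _ _, ?_, ?_, ?_⟩ <;>
          (have E1 : q.1 + 1 + ((0:Nat):Int) * 1 = (u : Int) := by push_cast at hq1 ⊢; omega) <;>
          (have E2 : q.2 + -1 + ((0:Nat):Int) * -1 = (v : Int) := by push_cast at hq2 ⊢; omega) <;>
          rw [E1, E2]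
        · exact hpin
        · rw [hpat, hP]; decide
        · rw [hpat, hP]; decide
    · rw [if_neg hP] at hd
      obtain ⟨hin0, m, hc, hend⟩ := pvRayA_sound g q d.1 d.2 _ _ _ hd
      have hq1 : (u : Int) + d.1 + (m : Int) * d.1 = q.1 := congrArg Prod.fst hend
      have hq2 : (v : Int) + d.2 + (m : Int) * d.2 = q.2 := congrArg Prod.snd hend
      have E1 : q.1 + -d.1 + (m : Int) * -d.1 = (u : Int) := by rw [← hq1]; ring
      have E2 : q.2 + -d.2 + (m : Int) * -d.2 = (v : Int) := by rw [← hq2]; ring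
      refine ⟨-d.1, -d.2, pvDirsA_mem_dirs8 _ d hdmem, m, ?_, ?_, ?_, ?_⟩
      · exact pvClearFrom_rev g ((u : Int), (v : Int)) q d.1 d.2 m hc hq1 hq2
      · rw [E1, E2]; exact hpin
      · rw [E1, E2, hpat]
        rcases hp with h | h | h | h <;> rw [h] <;> first | exact absurd h hP | decide
      · rw [E1, E2, hpat]
        refine (pvMatch_iff (-d.1) (-d.2) _ _ (pvDirsA_mem_dirs8 _ d hdmem)).mpr
          ⟨hp, by simpa using hdmem, fun hPP => absurd hPP hP⟩
  · rintro ⟨dr, dc, hdm, m, hc, hin, hne, hatt⟩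
    have hinE := hin
    obtain ⟨u, v, hu1, hv1⟩ := pvInB_exists_nat g _ _ hin
    rw [hu1, hv1] at hin hne hatt
    obtain ⟨hu, hv⟩ := (pvInB_nat g u v).mp hin
    rw [pvAt_nat g u v] at hne hatt
    obtain ⟨hp, hdmem, hPk⟩ := (pvMatch_iff dr dc _ _ hdm).mp hatt
    refine ⟨u, hu, ?_⟩
    rw [pvScanRowA_iff]
    refine ⟨v, hv, hp, ?_⟩
    unfold pvCanAttack
    rw [List.any_eq_true]
    refine ⟨(-dr, -dc), hdmem, ?_⟩
    by_cases hP : (g.getD u []).getD v '.' = 'P'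
    · rw [if_pos hP, decide_eq_true_eq]
      have hm0 : m = 0 := by have := hPk hP; omega
      subst hm0
      simp only [Nat.cast_zero, zero_mul, add_zero] at hu1 hv1
      refine Prod.ext ?_ ?_
      · show 0 + (u : Int) + -dr = q.1
        omega
      · show 0 + (v : Int) + -dc = q.2
        omega
    · rw [if_neg hP]
      simp only [zero_add]
      have hin2 : pvInB g (q.1 + ((m + 1 : Nat) : Int) * dr) (q.2 + ((m + 1 : Nat) : Int) * dc) = true := by
        rw [pvPos_succ q.1 dr m, pvPos_succ q.2 dc m]; exact hinE
      have hb := pvBound g dr dc q.1 q.2 (m + 1) hdm hq hin2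
      refine pvRayA_complete g q (-dr) (-dc) m (pvFuel g) (u : Int) (v : Int) (by omega) hin
        (pvClearFrom_rev g q ((u : Int), (v : Int)) dr dc m hc hu1 hv1) (Prod.ext ?_ ?_)
      · show (u : Int) + -dr + (m : Int) * -dr = q.1
        rw [← hu1]; ring
      · show (v : Int) + -dc + (m : Int) * -dc = q.2
        rw [← hv1]; ring

-- B's 8-ray test ⟺ the king-centric predicate
lemma pvB_iff_att (g : List (List Char)) (q : Int × Int) (hq : pvInB g q.1 q.2 = true) :
    (pvDirs8.any fun d => pvRayB g d.1 d.2 (pvFuel g) (q.1 + d.1) (q.2 + d.2) 1) = true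
      ↔ pvAtt g q := by
  rw [List.any_eq_true]
  constructor
  · rintro ⟨d, hd, hray⟩
    obtain ⟨m, hc, hin, hne, hatt⟩ := pvRayB_sound g d.1 d.2 _ _ _ _ hray
    exact ⟨d.1, d.2, by simpa using hd, m, hc, hin, hne, hatt⟩
  · rintro ⟨dr, dc, hd, m, hc, hin, hne, hatt⟩
    refine ⟨(dr, dc), hd, ?_⟩
    have hin2 : pvInB g (q.1 + ((m + 1 : Nat) : Int) * dr) (q.2 + ((m + 1 : Nat) : Int) * dc) = true := by
      rw [pvPos_succ q.1 dr m, pvPos_succ q.2 dc m]; exact hin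
    have hb := pvBound g dr dc q.1 q.2 (m + 1) hd hq hin2
    exact pvRayB_complete g dr dc m (pvFuel g) _ _ 1 (by omega) hc hin hne hatt

-- ===== VERDICT (by name: the statement is the Claim_ definition above) =====
theorem checkmate_spec : Claim_equal_checkmate := by
  intro board _
  unfold Spec_checkmate checkmate checkmate_alt
  rw [pvFindKB_eq]
  cases h : pvFindK 0 (pvGrid board) with
  | none => simp only [h]
  | some q =>
    have hq := pvFindK_inB _ _ h
    have key : pvScanA (pvGrid board) q 0 (pvGrid board)
        = (pvDirs8.any fun d =>
            pvRayB (pvGrid board) d.1 d.2 (pvFuel (pvGrid board)) (q.1 + d.1) (q.2 + d.2) 1) := by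
      rw [Bool.eq_iff_iff, pvA_iff_att _ _ hq, pvB_iff_att _ _ hq]
    simp only [h, key]
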